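-- pv_equiv track=rewrite | github.com/taoshen58/DiSAN | SNLI_disan/src/utils/tree/str_transform.py | tokenize_str_format_tree
-- ===== SOURCE A (Python) =====
-- def tokenize_str_format_tree(tree_str):
--
--     # 1. spilt by ' '
--     raw_token_list = tree_str.split(' ')
--     # 2. split when find  '(' or ')'
--     token_list = []
--     for token in raw_token_list:
--         new_token_list = []
--         idx_in_token = 0
--         for idx_char, char in enumerate(token):
--             if char == '(' or char == ')':
--                 if idx_char > idx_in_token:
--                     new_token_list.append(token[idx_in_token: idx_char])
--                 new_token_list.append(char)
--                 idx_in_token = idx_char + 1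
--         if idx_in_token < len(token):
--             new_token_list.append(token[idx_in_token:])
--         token_list += new_token_list
--     return token_list
-- ===== SOURCE B (Python) =====
-- def tokenize_str_format_tree(tree_str):
--     # single left-to-right pass with a token buffer (same result as split-then-rescan)
--     result = []
--     buf = ''
--     for ch in tree_str:
--         if ch == '(' or ch == ')':
--             if buf:
--                 result.append(buf)
--             result.append(ch)
--             buf = ''
--         elif ch == ' ':
--             if buf:
--                 result.append(buf)
--             buf = ''
--         else:
--             buf += ch
--     if buf:
--         result.append(buf)
--     return result
-- ===== Notes on version B (the rewrite author's own statement) =====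
-- stated objective: simpler
-- what changed: Replaced A's split-on-space followed by an indexed rescan of each fragment (enumerate plus slice bookkeeping) with one flat left-to-right pass over the string maintaining a current-token buffer that is flushed at parenthesis and space characters.
import Mathlib
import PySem

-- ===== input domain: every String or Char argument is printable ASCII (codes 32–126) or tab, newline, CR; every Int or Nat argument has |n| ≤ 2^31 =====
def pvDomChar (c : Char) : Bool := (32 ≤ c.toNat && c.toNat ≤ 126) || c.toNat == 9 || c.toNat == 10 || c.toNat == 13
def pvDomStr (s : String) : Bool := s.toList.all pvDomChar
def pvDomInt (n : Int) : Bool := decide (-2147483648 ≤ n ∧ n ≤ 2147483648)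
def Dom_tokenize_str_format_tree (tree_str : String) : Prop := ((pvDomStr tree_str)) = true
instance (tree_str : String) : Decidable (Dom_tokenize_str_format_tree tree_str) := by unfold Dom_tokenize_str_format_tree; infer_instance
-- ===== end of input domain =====

-- B replaces A's split-on-space + indexed rescan of each fragment by one flat buffered pass; same output, similar cost (objective: simpler).

-- ===== PORT A =====
-- Strings are handled as their code-point lists (PySem.Chars / PySem.List primitives, exact per PYSEM).
def tokenize_str_format_tree (tree_str : String) : List String :=
  -- 1. split by ' '
  let raw_token_list := PySem.Chars.splitOn tree_str.toList [' ']
  -- 2. split when find '(' or ')'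
  raw_token_list.foldl (fun token_list token =>
    token_list ++
      (let st := (PySem.List.enumerate token 0).foldl
        (fun (st : List String × Int) ic =>
          if ic.2 = '(' ∨ ic.2 = ')' then
            (st.1 ++ (if ic.1 > st.2 then [String.ofList (PySem.List.slice token (some st.2) (some ic.1))] else [])
                  ++ [String.ofList [ic.2]], ic.1 + 1)
          else st)
        ([], (0 : Int))
       if st.2 < (token.length : Int) then st.1 ++ [String.ofList (PySem.List.slice token (some st.2) none)] else st.1))
    ([] : List String)

-- ===== PORT B =====
def tokenize_str_format_tree_alt (tree_str : String) : List String :=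
  let st := tree_str.toList.foldl
    (fun (st : List String × List Char) c =>
      if c = '(' ∨ c = ')' then
        (st.1 ++ (if st.2.isEmpty then [] else [String.ofList st.2]) ++ [String.ofList [c]], [])
      else if c = ' ' then
        (st.1 ++ (if st.2.isEmpty then [] else [String.ofList st.2]), [])
      else (st.1, st.2 ++ [c]))
    ([], [])
  st.1 ++ (if st.2.isEmpty then [] else [String.ofList st.2])

-- ===== PRECONDITION & SPEC =====
def Spec_tokenize_str_format_tree (tree_str : String) (out : List String) : Prop := out = tokenize_str_format_tree_alt tree_str
instance (tree_str : String) (out : List String) : Decidable (Spec_tokenize_str_format_tree tree_str out) := by unfold Spec_tokenize_str_format_tree; infer_instance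

-- ===== CLAIM (what is proved, stated in full; the proofs are below) =====
def Claim_equal_tokenize_str_format_tree : Prop := ∀ (tree_str : String), Dom_tokenize_str_format_tree tree_str → Spec_tokenize_str_format_tree tree_str (tokenize_str_format_tree tree_str)

-- ===== LEMMAS AND PROOFS =====

-- B's per-character step, fold and finalizer (exactly the port's lambda).
def pvStep (st : List String × List Char) (c : Char) : List String × List Char :=
  if c = '(' ∨ c = ')' then
    (st.1 ++ (if st.2.isEmpty then [] else [String.ofList st.2]) ++ [String.ofList [c]], [])
  else if c = ' ' then
    (st.1 ++ (if st.2.isEmpty then [] else [String.ofList st.2]), [])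
  else (st.1, st.2 ++ [c])

def pvK (st : List String × List Char) (l : List Char) : List String × List Char :=
  l.foldl pvStep st

def pvFin (st : List String × List Char) : List String :=
  st.1 ++ (if st.2.isEmpty then [] else [String.ofList st.2])

-- Reference split-on-space (accumulator form).
def pvS (cur : List Char) : List Char → List (List Char)
  | [] => [cur]
  | c :: r => if c = ' ' then cur :: pvS [] r else pvS (cur ++ [c]) r

-- A's inner step and inner loop (exactly the port's inner code).
def pvAStep (token : List Char) (st : List String × Int) (ic : Int × Char) : List String × Int :=
  if ic.2 = '(' ∨ ic.2 = ')' then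
    (st.1 ++ (if ic.1 > st.2 then [String.ofList (PySem.List.slice token (some st.2) (some ic.1))] else [])
          ++ [String.ofList [ic.2]], ic.1 + 1)
  else st

def pvInner (token : List Char) : List String :=
  if ((PySem.List.enumerate token 0).foldl (pvAStep token) ([], (0 : Int))).2 < (token.length : Int)
  then ((PySem.List.enumerate token 0).foldl (pvAStep token) ([], (0 : Int))).1
        ++ [String.ofList (PySem.List.slice token
              (some ((PySem.List.enumerate token 0).foldl (pvAStep token) ([], (0 : Int))).2) none)]
  else ((PySem.List.enumerate token 0).foldl (pvAStep token) ([], (0 : Int))).1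

lemma alt_eq (s : String) :
    tokenize_str_format_tree_alt s = pvFin (pvK ([], []) s.toList) := rfl

lemma A_unfold (s : String) :
    tokenize_str_format_tree s
      = (PySem.Chars.splitOn s.toList [' ']).foldl
          (fun token_list token => token_list ++ pvInner token) [] := rfl

lemma pvK_nil (st : List String × List Char) : pvK st [] = st := rfl
lemma pvK_cons (st : List String × List Char) (c : Char) (l : List Char) :
    pvK st (c :: l) = pvK (pvStep st c) l := rfl
lemma pvK_concat (st : List String × List Char) (l : List Char) (c : Char) :
    pvK st (l ++ [c]) = pvStep (pvK st l) c := by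
  simp [pvK, List.foldl_append]

lemma splitOn_go_space : ∀ (fuel : Nat) (l : List Char), l.length < fuel →
    ∀ (cur : List Char) (acc : List (List Char)),
    PySem.Chars.splitOn.go [' '] fuel l cur acc = acc.reverse ++ pvS cur.reverse l := by
  intro fuel
  induction fuel with
  | zero => intro l hl cur acc; exact absurd hl (by omega)
  | succ f ih =>
    intro l hl cur acc
    match l with
    | [] => simp [PySem.Chars.splitOn.go, pvS]
    | c :: rest =>
      by_cases hc : c = ' '
      · subst hc
        have heq : PySem.Chars.splitOn.go [' '] (f+1) (' ' :: rest) cur acc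
            = PySem.Chars.splitOn.go [' '] f rest [] (cur.reverse :: acc) := by
          simp [PySem.Chars.splitOn.go]
        rw [heq, ih rest (by simpa using Nat.lt_of_succ_lt_succ hl)]
        simp [pvS]
      · have heq : PySem.Chars.splitOn.go [' '] (f+1) (c :: rest) cur acc
            = PySem.Chars.splitOn.go [' '] f rest (c :: cur) acc := by
          simp [PySem.Chars.splitOn.go, List.isPrefixOf]
          intro h; exact absurd h.symm hc
        rw [heq, ih rest (by simpa using Nat.lt_of_succ_lt_succ hl)]
        simp [pvS, hc]

lemma splitOn_space (cs : List Char) :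
    PySem.Chars.splitOn cs [' '] = pvS [] cs := by
  have := splitOn_go_space (cs.length + 1) cs (by omega) [] []
  simpa [PySem.Chars.splitOn] using this

lemma pvS_no_space : ∀ (cs cur : List Char), ' ' ∉ cur →
    ∀ t ∈ pvS cur cs, ' ' ∉ t := by
  intro cs
  induction cs with
  | nil => intro cur h t ht; simp [pvS] at ht; simpa [ht] using h
  | cons c r ih =>
    intro cur h t ht
    by_cases hc : c = ' '
    · subst hc
      simp [pvS] at ht
      rcases ht with rfl | ht
      · exact h
      · exact ih [] (by simp) t ht
    · simp [pvS, hc] at ht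
      exact ih (cur ++ [c]) (by simp [h, Ne.symm hc]) t ht

lemma pvK_out (l : List Char) : ∀ (o : List String) (b : List Char),
    pvK (o, b) l = (o ++ (pvK ([], b) l).1, (pvK ([], b) l).2) := by
  induction l with
  | nil => intro o b; simp [pvK_nil]
  | cons c r ih =>
    intro o b
    rw [pvK_cons, pvK_cons]
    have hstep : pvStep (o, b) c = (o ++ (pvStep ([], b) c).1, (pvStep ([], b) c).2) := by
      unfold pvStep; split_ifs <;> simp
    cases hsb : pvStep ([], b) c with
    | mk u b' =>
      rw [hsb] at hstep
      rw [hstep, ih (o ++ u) b', ih u b']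
      simp

lemma pvK_buf_suffix (l : List Char) : ∀ (o : List String) (b : List Char),
    (pvK (o, b) l).2 <:+ b ++ l := by
  induction l with
  | nil => intro o b; simp [pvK_nil]
  | cons c r ih =>
    intro o b
    rw [pvK_cons]
    have h2 : (pvStep (o, b) c).2 = [] ∨ (pvStep (o, b) c).2 = b ++ [c] := by
      unfold pvStep; split_ifs <;> simp
    cases hst : pvStep (o, b) c with
    | mk u b' =>
      rw [hst] at h2
      have hsuf := ih u b'
      simp only at h2
      rcases h2 with h2 | h2 <;> subst h2
      · refine hsuf.trans ?_
        simp only [List.nil_append]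
        exact ⟨b ++ [c], by simp⟩
      · refine hsuf.trans ?_
        simp

lemma innerA_inv : ∀ (r : List Char), ' ' ∉ r →
    ∀ (p cur : List Char) (out : List String),
    (PySem.List.enumerate r ((p.length + cur.length : Nat) : Int)).foldl
        (pvAStep (p ++ cur ++ r)) (out, (p.length : Int))
      = ((pvK (out, cur) r).1,
         ((p.length + cur.length + r.length : Nat) : Int) - ((pvK (out, cur) r).2.length : Int)) := by
  intro r
  induction r with
  | nil =>
    intro _ p cur out
    simp only [PySem.List.enumerate_nil, List.foldl_nil, pvK_nil, List.length_nil, Nat.add_zero]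
    congr 1
    push_cast
    ring
  | cons c r' ih =>
    intro hr p cur out
    have hc : c ≠ ' ' := fun h => hr (by simp [h])
    have hr' : ' ' ∉ r' := fun h => hr (by simp [h])
    rw [PySem.List.enumerate_cons, List.foldl_cons, pvK_cons]
    by_cases hpar : c = '(' ∨ c = ')'
    · have hstep : pvAStep (p ++ cur ++ (c :: r')) (out, (p.length : Int))
          (((p.length + cur.length : Nat) : Int), c)
          = (out ++ (if cur.isEmpty then [] else [String.ofList cur]) ++ [String.ofList [c]],
             ((p.length + cur.length : Nat) : Int) + 1) := by
        by_cases hcur : cur = []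
        · subst hcur; simp [pvAStep, hpar]
        · have h0 : 0 < cur.length := List.length_pos_iff.mpr hcur
          have hsl : PySem.List.slice (p ++ (cur ++ c :: r')) (some ((p.length : Int)))
              (some ((p.length : Int) + (cur.length : Int))) = cur := by
            have hcast : ((p.length : Int) + (cur.length : Int)) = ((p.length + cur.length : Nat) : Int) := by
              push_cast; ring
            rw [hcast, show ((p.length : Int)) = (((p.length : Nat)) : Int) from rfl,
                PySem.List.slice_natCast]
            simp
          simp [pvAStep, hpar, h0, hcur, hsl, List.isEmpty_iff]
      rw [hstep]
      have hstep2 : pvStep (out, cur) c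
          = (out ++ (if cur.isEmpty then [] else [String.ofList cur]) ++ [String.ofList [c]], []) := by
        unfold pvStep; simp [hpar]
      rw [hstep2]
      have ih' := ih hr' (p ++ cur ++ [c]) []
        (out ++ (if cur.isEmpty then [] else [String.ofList cur]) ++ [String.ofList [c]])
      simp only [List.length_nil, Nat.add_zero, List.append_nil] at ih'
      have htok : p ++ cur ++ (c :: r') = (p ++ cur ++ [c]) ++ r' := by simp
      have hlen : ((p.length + cur.length : Nat) : Int) + 1
          = (((p ++ cur ++ [c]).length : Nat) : Int) := by
        simp only [List.length_append, List.length_cons, List.length_nil]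
        push_cast; ring
      rw [htok, hlen, ih']
      congr 1
      simp only [List.length_append, List.length_cons, List.length_nil]
      push_cast; ring
    · have hstep : pvAStep (p ++ cur ++ (c :: r')) (out, (p.length : Int))
          (((p.length + cur.length : Nat) : Int), c) = (out, (p.length : Int)) := by
        simp [pvAStep, hpar]
      rw [hstep]
      have hstep2 : pvStep (out, cur) c = (out, cur ++ [c]) := by
        unfold pvStep; simp [hpar, hc]
      rw [hstep2]
      have ih' := ih hr' p (cur ++ [c]) out
      have htok : p ++ cur ++ (c :: r') = p ++ (cur ++ [c]) ++ r' := by simp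
      have hlen : ((p.length + cur.length : Nat) : Int) + 1
          = ((p.length + (cur ++ [c]).length : Nat) : Int) := by
        simp only [List.length_append, List.length_cons, List.length_nil]
        push_cast; ring
      rw [htok, hlen, ih']
      congr 1
      simp only [List.length_append, List.length_cons, List.length_nil]
      push_cast; ring

lemma suffix_drop_eq {b t : List Char} (h : b <:+ t) :
    t.drop (t.length - b.length) = b := by
  rcases h with ⟨q, rfl⟩
  simp

lemma innerA_eq (t : List Char) (ht : ' ' ∉ t) :
    pvInner t = pvFin (pvK ([], []) t) := by
  have h0 := innerA_inv t ht [] [] []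
  simp only [List.nil_append, List.length_nil, Nat.add_zero, Nat.zero_add, Nat.cast_zero] at h0
  unfold pvInner
  rw [h0]
  have hsuf : (pvK ([], ([] : List Char)) t).2 <:+ t := by
    simpa using pvK_buf_suffix t [] []
  have hble : (pvK ([], ([] : List Char)) t).2.length ≤ t.length := hsuf.length_le
  by_cases hbe : (pvK ([], ([] : List Char)) t).2 = []
  · have hcond : ¬ ((t.length : Int) - ((pvK ([], ([] : List Char)) t).2.length : Int) < (t.length : Int)) := by
      rw [hbe]; simp
    rw [if_neg hcond]
    simp [pvFin, hbe]
  · have hpos : 0 < (pvK ([], ([] : List Char)) t).2.length := List.length_pos_iff.mpr hbe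
    have hcond : ((t.length : Int) - ((pvK ([], ([] : List Char)) t).2.length : Int) < (t.length : Int)) := by
      omega
    rw [if_pos hcond]
    dsimp only
    have hnn : (0 : Int) ≤ (t.length : Int) - ((pvK ([], ([] : List Char)) t).2.length : Int) := by
      omega
    rw [PySem.List.slice_from t hnn]
    have htn : ((t.length : Int) - ((pvK ([], ([] : List Char)) t).2.length : Int)).toNat
        = t.length - (pvK ([], ([] : List Char)) t).2.length := by
      omega
    rw [htn, suffix_drop_eq hsuf]
    simp [pvFin, List.isEmpty_iff, hbe]

lemma main_inv : ∀ (cs cur : List Char), ' ' ∉ cur →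
    (pvS cur cs).flatMap (fun t => pvFin (pvK ([], []) t)) = pvFin (pvK (pvK ([], []) cur) cs) := by
  intro cs
  induction cs with
  | nil => intro cur _; simp [pvS, pvK_nil]
  | cons c r ih =>
    intro cur hcur
    by_cases hc : c = ' '
    · subst hc
      rw [show pvS cur (' ' :: r) = cur :: pvS [] r from by simp [pvS]]
      rw [List.flatMap_cons, ih [] (by simp), pvK_cons]
      have hstep : pvStep (pvK ([], []) cur) ' '
          = ((pvK ([], []) cur).1 ++ (if (pvK ([], []) cur).2.isEmpty then []
              else [String.ofList (pvK ([], []) cur).2]), []) := by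
        unfold pvStep
        rw [if_neg (by decide : ¬(' ' = '(' ∨ ' ' = ')')), if_pos rfl]
      rw [hstep, pvK_out r _ []]
      simp [pvFin, pvK_nil]
    · rw [show pvS cur (c :: r) = pvS (cur ++ [c]) r from by simp [pvS, hc]]
      rw [ih (cur ++ [c]) (by simp [hcur, Ne.symm hc]), pvK_concat, pvK_cons]

lemma flatMap_congr_mem {A B : Type} (l : List A) (f g : A → List B)
    (h : ∀ x ∈ l, f x = g x) : l.flatMap f = l.flatMap g := by
  induction l with
  | nil => rfl
  | cons x xs ih =>
    simp only [List.flatMap_cons, h x (by simp), ih fun y hy => h y (by simp [hy])]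

-- ===== VERDICT (by name: the statement is the Claim_ definition above) =====
theorem tokenize_str_format_tree_spec : Claim_equal_tokenize_str_format_tree := by
  intro s _
  show tokenize_str_format_tree s = tokenize_str_format_tree_alt s
  rw [alt_eq, A_unfold, PySem.List.foldl_append_eq_flatMap pvInner, List.nil_append, splitOn_space]
  rw [flatMap_congr_mem _ _ (fun t => pvFin (pvK ([], []) t))
      (fun t htm => innerA_eq t (pvS_no_space s.toList [] (by simp) t htm))]
  rw [main_inv s.toList [] (by simp), pvK_nil]
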